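-- pv_equiv track=rewrite | github.com/KhelKim/codingpractice2 | programmers/level2/compress_string.py | compress_s
-- ===== SOURCE A (Python) =====
-- def compress_s(s, length):
--     init_str = s[:length]
--     string = [(1, init_str)]
--     for start in range(length, len(s), length):
--         now = s[start:start+length]
--         last_count, last_str = string[-1]
--         if now == last_str:
--             string[-1] = (last_count+1, last_str)
--         else:
--             string.append((1, now))
--     result = "".join([str(count)+string if count > 1 else string for count, string in string])
--     return result
-- ===== SOURCE B (Python) =====
-- def compress_s(s, length):
--     blocks = [s[:length]] + [s[i:i+length] for i in range(length, len(s), length)]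
--     out = []
--     i = 0
--     n = len(blocks)
--     while i < n:
--         j = i
--         while j < n and blocks[j] == blocks[i]:
--             j += 1
--         run = j - i
--         out.append((str(run) if run > 1 else "") + blocks[i])
--         i = j
--     return "".join(out)
-- ===== Notes on version B (the rewrite author's own statement) =====
-- stated objective: alternative
-- what changed: B first materialises the whole block list, then run-length scans it with a two-pointer index loop emitting one rendered run per outer step, instead of A's single fold that keeps rewriting the last (count, block) pair of an accumulator list and renders at the end.
import Mathlib
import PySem

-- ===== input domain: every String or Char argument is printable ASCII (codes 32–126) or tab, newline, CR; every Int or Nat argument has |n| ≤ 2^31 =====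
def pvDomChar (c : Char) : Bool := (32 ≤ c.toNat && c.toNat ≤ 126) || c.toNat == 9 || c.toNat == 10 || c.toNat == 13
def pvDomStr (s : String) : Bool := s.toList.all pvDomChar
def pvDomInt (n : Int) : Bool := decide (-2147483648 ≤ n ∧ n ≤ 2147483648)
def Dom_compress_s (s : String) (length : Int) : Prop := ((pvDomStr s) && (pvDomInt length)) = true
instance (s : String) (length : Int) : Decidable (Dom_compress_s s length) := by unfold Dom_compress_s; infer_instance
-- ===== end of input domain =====

-- B is an alternative decomposition: it materialises the block list first and then
-- run-length scans it with two indices, instead of A's fold that keeps mutating the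
-- last (count, block) pair of an accumulator list (same cost; objective: alternative).

-- ===== PORT A =====
-- loop body of A: merge `now` into the last (count, block) pair or append a fresh pair
def pvLastMerge (acc : List (Int × List Char)) (now : List Char) : List (Int × List Char) :=
  match acc.getLast? with
  | some (c, b) => if now == b then acc.dropLast ++ [(c + 1, b)] else acc ++ [(1, now)]
  | none => acc   -- unreachable: the accumulator is seeded non-empty

def compress_s (s : String) (length : Int) : String :=
  let cs := s.toList
  let init_str := PySem.List.slice cs none (some length)
  let string :=
    (PySem.List.pyRange length (cs.length : Int) length).foldl
      (fun acc start => pvLastMerge acc (PySem.List.slice cs (some start) (some (start + length))))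
      [(1, init_str)]
  String.ofList (PySem.Chars.join []
    (string.map (fun p => if p.1 > 1 then PySem.Int.toChars p.1 ++ p.2 else p.2)))

-- ===== PORT B =====
-- inner while of B: advance j while blocks[j] == bi
def pvRunEnd (blocks : List (List Char)) (bi : List Char) (j : Nat) : Nat :=
  if h : j < blocks.length then
    if blocks[j] == bi then pvRunEnd blocks bi (j + 1) else j
  else j
termination_by blocks.length - j

-- termination facts for the outer while (cited by pvScan's decreasing_by)
theorem le_pvRunEnd (blocks : List (List Char)) (bi : List Char) (j : Nat) :
    j ≤ pvRunEnd blocks bi j := by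
  fun_induction pvRunEnd blocks bi j <;> omega

theorem lt_pvRunEnd (blocks : List (List Char)) (i : Nat) (h : i < blocks.length) :
    i < pvRunEnd blocks blocks[i] i := by
  rw [pvRunEnd]
  simp only [h, dif_pos, BEq.rfl, if_pos]
  have := le_pvRunEnd blocks blocks[i] (i + 1)
  omega

-- outer while of B: emit one rendered run per step
def pvScan (blocks : List (List Char)) (i : Nat) : List (List Char) :=
  if h : i < blocks.length then
    let j := pvRunEnd blocks blocks[i] i
    let run := j - i
    ((if run > 1 then PySem.Int.toChars (run : Int) else []) ++ blocks[i]) :: pvScan blocks j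
  else []
termination_by blocks.length - i
decreasing_by
  have := lt_pvRunEnd blocks i h
  omega

def compress_s_alt (s : String) (length : Int) : String :=
  let cs := s.toList
  let blocks := PySem.List.slice cs none (some length) ::
    (PySem.List.pyRange length (cs.length : Int) length).map
      (fun i => PySem.List.slice cs (some i) (some (i + length)))
  String.ofList (PySem.Chars.join [] (pvScan blocks 0))

-- ===== PRECONDITION & SPEC =====
-- length = 0 makes range(length, len(s), length) raise ValueError (step 0) in both programs
def Pre_compress_s (s : String) (length : Int) : Prop := length ≠ 0
instance (s : String) (length : Int) : Decidable (Pre_compress_s s length) := by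
  unfold Pre_compress_s; infer_instance

def pvWitness_compress_s : String × Int := ("aabba", 2)

def Spec_compress_s (s : String) (length : Int) (out : String) : Prop := out = compress_s_alt s length
instance (s : String) (length : Int) (out : String) : Decidable (Spec_compress_s s length out) := by unfold Spec_compress_s; infer_instance

-- ===== CLAIM (what is proved, stated in full; the proofs are below) =====
def Claim_equal_compress_s : Prop := ∀ (s : String) (length : Int), Dom_compress_s s length → Pre_compress_s s length → Spec_compress_s s length (compress_s s length)

-- ===== LEMMAS AND PROOFS =====

-- run-length encoding of a block list, A-style: count carried forward in the head pair
def pvEnc (c : Int) (b : List Char) : List (List Char) → List (Int × List Char)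
  | [] => [(c, b)]
  | x :: xs => if x == b then pvEnc (c + 1) b xs else (c, b) :: pvEnc 1 x xs

def pvEncTail : List (List Char) → List (Int × List Char)
  | [] => []
  | x :: xs => pvEnc 1 x xs

-- rendered run-length encoding, B-style (structural form of pvScan)
def pvEncL : List (List Char) → List (List Char)
  | [] => []
  | b :: bs =>
    ((if (bs.takeWhile (· == b)).length + 1 > 1
        then PySem.Int.toChars (((bs.takeWhile (· == b)).length + 1 : Nat) : Int) else []) ++ b)
      :: pvEncL (bs.dropWhile (· == b))
termination_by bs => bs.length
decreasing_by
  have := List.length_dropWhile_le (p := (· == b)) (l := bs)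
  simp only [List.length_cons]
  omega

def pvRender : List (Int × List Char) → List (List Char) :=
  List.map (fun p => if p.1 > 1 then PySem.Int.toChars p.1 ++ p.2 else p.2)

theorem pvEnc_foldl (bs : List (List Char)) :
    ∀ (acc : List (Int × List Char)) (c : Int) (b : List Char),
      List.foldl pvLastMerge (acc ++ [(c, b)]) bs = acc ++ pvEnc c b bs := by
  induction bs with
  | nil => intro acc c b; simp [pvEnc]
  | cons x xs ih =>
    intro acc c b
    simp only [List.foldl_cons, pvEnc]
    by_cases hx : x == b
    · simp [pvLastMerge, hx, ih]
    · have hstep : pvLastMerge (acc ++ [(c, b)]) x = (acc ++ [(c, b)]) ++ [(1, x)] := by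
        simp [pvLastMerge, hx]
      rw [hstep, ih, if_neg (by simp [hx])]
      simp

theorem pvRunEnd_eq (blocks : List (List Char)) (bi : List Char) (j : Nat) :
    pvRunEnd blocks bi j = j + ((blocks.drop j).takeWhile (· == bi)).length := by
  fun_induction pvRunEnd blocks bi j with
  | case1 j h hb ih =>
    rw [ih, List.drop_eq_getElem_cons h]
    simp only [List.takeWhile_cons, hb, if_true, List.length_cons]
    omega
  | case2 j h hb =>
    rw [List.drop_eq_getElem_cons h]
    simp [hb]
  | case3 j h =>
    rw [List.drop_eq_nil_iff.mpr (by omega)]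
    simp

theorem pvEnc_shape (bs : List (List Char)) :
    ∀ (c : Int) (b : List Char),
      pvEnc c b bs = (c + ((bs.takeWhile (· == b)).length : Int), b)
        :: pvEncTail (bs.dropWhile (· == b)) := by
  induction bs with
  | nil => intro c b; simp [pvEnc, pvEncTail]
  | cons x xs ih =>
    intro c b
    by_cases hx : x == b
    · rw [pvEnc, if_pos hx, ih]
      simp only [List.takeWhile_cons, List.dropWhile_cons, hx, if_true, List.length_cons]
      congr 2
      push_cast
      ring
    · rw [pvEnc, if_neg hx]
      simp only [List.takeWhile_cons, List.dropWhile_cons, hx]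
      simp [pvEncTail]

theorem pvRender_encTail (bs : List (List Char)) :
    pvRender (pvEncTail bs) = pvEncL bs := by
  induction hn : bs.length using Nat.strong_induction_on generalizing bs with
  | _ n ih =>
    cases bs with
    | nil => simp [pvEncTail, pvEncL, pvRender]
    | cons b rest =>
      rw [pvEncTail, pvEnc_shape, pvEncL, pvRender, List.map_cons]
      have htail : pvRender (pvEncTail (rest.dropWhile (· == b))) = pvEncL (rest.dropWhile (· == b)) := by
        have hlt : (rest.dropWhile (· == b)).length < n := by
          have := List.length_dropWhile_le (p := (· == b)) (l := rest)
          simp only [List.length_cons] at hn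
          omega
        exact ih _ hlt _ rfl
      rw [← htail]
      congr 1
      set k := (rest.takeWhile (· == b)).length with hk
      by_cases h0 : 0 < k
      · rw [if_pos (by push_cast; omega), if_pos (by omega)]
        congr 2
        push_cast
        ring
      · rw [if_neg (by push_cast; omega), if_neg (by omega)]
        simp

theorem pvScan_eq (blocks : List (List Char)) (i : Nat) :
    pvScan blocks i = pvEncL (blocks.drop i) := by
  fun_induction pvScan blocks i with
  | case1 i h j run ih =>
    have hdrop : blocks.drop i = blocks[i] :: blocks.drop (i + 1) := List.drop_eq_getElem_cons h
    have hj : j = i + 1 + (( (blocks.drop (i+1)).takeWhile (· == blocks[i])).length) := by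
      show pvRunEnd blocks blocks[i] i = _
      rw [pvRunEnd_eq, hdrop]
      simp only [List.takeWhile_cons, BEq.rfl, if_true, List.length_cons]
      omega
    have key : ∀ (l : List (List Char)) (b : List Char),
        l.drop (l.takeWhile (· == b)).length = l.dropWhile (· == b) := by
      intro l b
      induction l with
      | nil => simp
      | cons x xs ih =>
        by_cases hx : x == b <;>
          simp [hx, ih]
    have hrest : blocks.drop j = (blocks.drop (i+1)).dropWhile (· == blocks[i]) := by
      rw [← key (blocks.drop (i+1)) blocks[i], List.drop_drop]
      rw [hj]
    have hrun : run = ((blocks.drop (i+1)).takeWhile (· == blocks[i])).length + 1 := by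
      show j - i = _
      omega
    rw [hdrop, pvEncL, ih, hrest, hrun]
  | case2 i h =>
    rw [List.drop_eq_nil_iff.mpr (by omega)]
    simp [pvEncL]

theorem pvPieces_eq (init : List Char) (tail : List (List Char)) :
    (List.foldl pvLastMerge [(1, init)] tail).map
        (fun p => if p.1 > 1 then PySem.Int.toChars p.1 ++ p.2 else p.2)
      = pvScan (init :: tail) 0 := by
  have hfold := pvEnc_foldl tail [] 1 init
  simp only [List.nil_append] at hfold
  rw [hfold, pvScan_eq, List.drop_zero]
  exact pvRender_encTail (init :: tail)

theorem compress_s_spec : Claim_equal_compress_s := by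
  intro s length _ _
  show compress_s s length = compress_s_alt s length
  simp only [compress_s, compress_s_alt]
  have hmap :
      List.foldl
        (fun acc start => pvLastMerge acc (PySem.List.slice s.toList (some start) (some (start + length))))
        [((1 : Int), PySem.List.slice s.toList none (some length))]
        (PySem.List.pyRange length (s.toList.length : Int) length)
      = List.foldl pvLastMerge
        [((1 : Int), PySem.List.slice s.toList none (some length))]
        ((PySem.List.pyRange length (s.toList.length : Int) length).map
          (fun i => PySem.List.slice s.toList (some i) (some (i + length)))) := by
    rw [List.foldl_map]
  rw [hmap, pvPieces_eq]
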